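-- pv_equiv track=rewrite | github.com/justusjb/textarenamcp | agents/mcp_agent.py | enhance_observation_with_word_results
-- ===== SOURCE A (Python) =====
-- def enhance_observation_with_word_results(observation, words):
--     """
--     Enhance the observation with word results.
--
--     Args:
--         observation: The original observation
--         words: List of words found
--
--     Returns:
--         str: Enhanced observation
--     """
--     if not words:
--         return observation
--
--     # Add a section with word suggestions
--     enhanced_observation = observation + "\n\n"
--     enhanced_observation += "Here are some possible words you can form with the available letters:\n"
--
--     # Group words by length for better organization
--     words_by_length = {}
--     for word in words:
--         length = len(word)
--         if length not in words_by_length: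
--             words_by_length[length] = []
--         words_by_length[length].append(word)
--
--     # Add words to the observation, starting with the longest
--     for length in sorted(words_by_length.keys(), reverse=True):
--         word_list = words_by_length[length]
--         # Limit to 10 words per length to avoid overwhelming Claude
--         display_words = word_list[:10]
--         enhanced_observation += f"\n{length}-letter words: {', '.join(display_words)}"
--         if len(word_list) > 10:
--             enhanced_observation += f" (and {len(word_list) - 10} more)"
--
--     return enhanced_observation
-- ===== SOURCE B (Python) =====
-- def enhance_observation_with_word_results(observation, words):
--     """Sort-then-scan rewrite: stable sort by descending length, then emit consecutive equal-length runs."""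
--     if not words:
--         return observation
--     out = observation + "\n\n" + "Here are some possible words you can form with the available letters:\n"
--     ordered = sorted(words, key=lambda w: -len(w))
--     i = 0
--     n = len(ordered)
--     while i < n:
--         length = len(ordered[i])
--         j = i + 1
--         while j < n and len(ordered[j]) == length:
--             j += 1
--         run = ordered[i:j]
--         out += f"\n{length}-letter words: {', '.join(run[:10])}"
--         if len(run) > 10:
--             out += f" (and {len(run) - 10} more)"
--         i = j
--     return out
-- ===== Notes on version B (the rewrite author's own statement) =====
-- stated objective: alternative
-- what changed: Replaces A's dict-bucketing by length plus a separate sort of the keys with one stable sort of the words keyed by -len followed by a single scan that emits each consecutive equal-length run.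
import Mathlib
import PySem

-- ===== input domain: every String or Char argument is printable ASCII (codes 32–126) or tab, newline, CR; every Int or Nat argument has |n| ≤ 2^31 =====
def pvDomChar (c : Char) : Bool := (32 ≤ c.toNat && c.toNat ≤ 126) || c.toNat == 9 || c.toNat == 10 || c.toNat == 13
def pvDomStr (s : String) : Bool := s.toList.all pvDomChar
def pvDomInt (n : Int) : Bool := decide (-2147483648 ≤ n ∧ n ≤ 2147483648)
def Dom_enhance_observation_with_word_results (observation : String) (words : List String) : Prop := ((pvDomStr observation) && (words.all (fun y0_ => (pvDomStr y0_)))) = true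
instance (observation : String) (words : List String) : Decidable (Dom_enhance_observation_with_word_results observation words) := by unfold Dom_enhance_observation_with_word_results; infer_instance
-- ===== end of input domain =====

-- B replaces A's dict-bucketing-then-key-sort by one stable sort (key = -len) followed by a
-- single scan over consecutive equal-length runs; alternative decomposition, same output.


-- ===== PORT A =====
def enhance_observation_with_word_results (observation : String) (words : List String) : String :=
  if words = [] then observation
  else
    let enhanced := observation ++ "\n\n" ++ "Here are some possible words you can form with the available letters:\n"
    let words_by_length := words.foldl (fun d word =>
      let length := PySem.Str.len word
      let d1 := if d.contains length then d else d.insert length []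
      d1.insert length (d1.getD length [] ++ [word])) PySem.Dict.empty
    (PySem.List.sorted words_by_length.keys (fun k => k) true).foldl (fun acc length =>
      let word_list := words_by_length.getD length []
      let display_words := PySem.List.slice word_list none (some 10)
      let acc := acc ++ "\n" ++ PySem.Int.toStr length ++ "-letter words: " ++ PySem.Str.join ", " display_words
      if PySem.List.len word_list > 10 then
        acc ++ " (and " ++ PySem.Int.toStr (PySem.List.len word_list - 10) ++ " more)"
      else acc) enhanced

-- ===== PORT B =====
-- the run scan: peel the maximal run of words sharing the head's length, emit its line, recurse
def pvBgroups : List String → String → String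
  | [], acc => acc
  | w :: ws, acc =>
    let length := PySem.Str.len w
    let run := w :: ws.takeWhile (fun v => PySem.Str.len v == length)
    let rest := ws.dropWhile (fun v => PySem.Str.len v == length)
    let acc := acc ++ "\n" ++ PySem.Int.toStr length ++ "-letter words: " ++ PySem.Str.join ", " (PySem.List.slice run none (some 10))
    let acc := if PySem.List.len run > 10 then
        acc ++ " (and " ++ PySem.Int.toStr (PySem.List.len run - 10) ++ " more)"
      else acc
    pvBgroups rest acc
termination_by s _ => s.length
decreasing_by
  simp only [List.length_cons]
  exact Nat.lt_succ_of_le (List.Sublist.length_le (List.dropWhile_sublist _))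


def enhance_observation_with_word_results_alt (observation : String) (words : List String) : String :=
  if words = [] then observation
  else
    pvBgroups (PySem.List.sorted words (fun w => -(PySem.Str.len w)) false)
      (observation ++ "\n\n" ++ "Here are some possible words you can form with the available letters:\n")

-- ===== PRECONDITION & SPEC =====
def Spec_enhance_observation_with_word_results (observation : String) (words : List String) (out : String) : Prop := out = enhance_observation_with_word_results_alt observation words
instance (observation : String) (words : List String) (out : String) : Decidable (Spec_enhance_observation_with_word_results observation words out) := by unfold Spec_enhance_observation_with_word_results; infer_instance

-- ===== CLAIM (what is proved, stated in full; the proofs are below) =====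
def Claim_equal_enhance_observation_with_word_results : Prop := ∀ (observation : String) (words : List String), Dom_enhance_observation_with_word_results observation words → Spec_enhance_observation_with_word_results observation words (enhance_observation_with_word_results observation words)

-- ===== LEMMAS AND PROOFS =====

-- the common per-group rendering step (proof-side abbreviation; both ports inline exactly this)

def pvStep (length : Int) (word_list : List String) (acc : String) : String :=
  let acc := acc ++ "\n" ++ PySem.Int.toStr length ++ "-letter words: " ++ PySem.Str.join ", " (PySem.List.slice word_list none (some 10))
  if PySem.List.len word_list > 10 then
    acc ++ " (and " ++ PySem.Int.toStr (PySem.List.len word_list - 10) ++ " more)"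
  else acc

-- A's dict-building step (proof-side name for A's inline loop body)
def pvAStep (d : PySem.Dict Int (List String)) (word : String) : PySem.Dict Int (List String) :=
  let length := PySem.Str.len word
  let d1 := if d.contains length then d else d.insert length []
  d1.insert length (d1.getD length [] ++ [word])

lemma pvAStep_getD (d : PySem.Dict Int (List String)) (word : String) (l : Int) :
    (pvAStep d word).getD l [] = if l = PySem.Str.len word then d.getD l [] ++ [word] else d.getD l [] := by
  obtain ⟨L, hL⟩ : ∃ L, PySem.Str.len word = L := ⟨_, rfl⟩
  simp only [pvAStep, hL]
  by_cases h : d.contains L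
  · simp only [h, if_true, PySem.Dict.getD_insert]
    split_ifs with hl
    · rw [hl]
    · rfl
  · simp only [h, Bool.false_eq_true, if_false, PySem.Dict.getD_insert]
    split_ifs with hl
    · rw [hl, PySem.Dict.getD_of_not_contains d ([] : List String) (by simpa using h)]
    · rfl

lemma pvAStep_keys (d : PySem.Dict Int (List String)) (word : String) :
    (pvAStep d word).keys = PySem.Set.add d.keys (PySem.Str.len word) := by
  obtain ⟨L, hL⟩ : ∃ L, PySem.Str.len word = L := ⟨_, rfl⟩
  simp only [pvAStep, hL]
  by_cases h : d.contains L
  · simp only [h, if_true]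
    rw [PySem.Dict.keys_insert_of_contains _ _ h,
      PySem.Set.add_of_mem ((PySem.Dict.contains_iff_mem_keys _ _).mp h)]
  · simp only [h, Bool.false_eq_true, if_false]
    rw [PySem.Dict.keys_insert_of_contains _ _ (PySem.Dict.contains_insert_self _ _ _),
      PySem.Dict.keys_insert_of_not_contains _ _ (by simpa using h),
      PySem.Set.add_of_not_mem]
    intro hm
    exact absurd ((PySem.Dict.contains_iff_mem_keys _ _).mpr hm) (by simpa using h)

lemma pvAfold_getD (ws : List String) (d : PySem.Dict Int (List String)) (l : Int) :
    (ws.foldl pvAStep d).getD l [] = d.getD l [] ++ ws.filter (fun w => PySem.Str.len w == l) := by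
  induction ws generalizing d with
  | nil => simp
  | cons w ws ih =>
    simp only [List.foldl_cons, List.filter_cons, ih, pvAStep_getD]
    by_cases h : l = PySem.Str.len w
    · rw [if_pos h, if_pos (by rw [h, beq_self_eq_true] : (PySem.Str.len w == l) = true)]
      simp
    · have hb : (PySem.Str.len w == l) = false := beq_eq_false_iff_ne.mpr (fun hh => h hh.symm)
      rw [if_neg h, if_neg (by rw [hb]; exact Bool.false_ne_true)]

lemma pvAfold_keys (ws : List String) (d : PySem.Dict Int (List String)) :
    (ws.foldl pvAStep d).keys = ws.foldl (fun s w => PySem.Set.add s (PySem.Str.len w)) d.keys := by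
  induction ws generalizing d with
  | nil => rfl
  | cons w ws ih => simp only [List.foldl_cons, ih, pvAStep_keys]


lemma pvInsertBy_filter {α : Type} (key : α → Int) (x : α) (k : Int) :
    ∀ ys : List α, ys.Pairwise (fun a b => key a ≤ key b) →
      (PySem.List.insertBy (fun a b => decide (key a < key b)) x ys).filter (fun z => key z == k) =
      if key x == k then ys.filter (fun z => key z == k) ++ [x] else ys.filter (fun z => key z == k) := by
  intro ys
  induction ys with
  | nil =>
    intro _
    simp only [PySem.List.insertBy]
    split_ifs with h <;> simp [h]
  | cons y ys ih =>
    intro hp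
    have hpy := (List.pairwise_cons.mp hp).1
    have hpt := (List.pairwise_cons.mp hp).2
    simp only [PySem.List.insertBy]
    by_cases hlt : key x < key y
    · rw [if_pos (by simpa using hlt)]
      by_cases hxk : key x == k
      · -- key x = k < key y ≤ all: filter (y :: ys) = []
        have hk : key x = k := by simpa using hxk
        have hnil : (y :: ys).filter (fun z => key z == k) = [] := by
          rw [List.filter_eq_nil_iff]
          intro z hz
          have : key y ≤ key z := by
            rcases List.mem_cons.mp hz with hz | hz
            · exact hz ▸ le_refl _
            · exact hpy z hz
          simp only [beq_iff_eq]
          omega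
        rw [if_pos hxk, List.filter_cons_of_pos (by simpa using hxk), hnil]
        rfl
      · rw [if_neg (by simpa using hxk), List.filter_cons_of_neg (by simpa using hxk)]
    · rw [if_neg (by simpa using hlt)]
      have ihy := ih hpt
      by_cases hyk : key y == k
      · rw [List.filter_cons_of_pos (by simpa using hyk), List.filter_cons_of_pos (by simpa using hyk), ihy]
        split_ifs <;> simp
      · rw [List.filter_cons_of_neg (by simpa using hyk), List.filter_cons_of_neg (by simpa using hyk), ihy]

lemma pvSorted_filter {α : Type} (key : α → Int) (xs : List α) (k : Int) :
    (PySem.List.sorted xs key false).filter (fun z => key z == k) = xs.filter (fun z => key z == k) := by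
  induction xs using List.reverseRecOn with
  | nil => rfl
  | append_singleton xs x ih =>
    rw [PySem.List.sorted_eq_foldl_insertBy, List.foldl_append, List.foldl_cons, List.foldl_nil,
      ← PySem.List.sorted_eq_foldl_insertBy,
      pvInsertBy_filter key x k _ (PySem.List.sorted_pairwise xs key), ih,
      List.filter_append]
    split_ifs <;> simp_all

lemma pvBgroups_nil (acc : String) : pvBgroups [] acc = acc := by
  rw [pvBgroups]

lemma pvBgroups_cons (w : String) (ws : List String) (acc : String) :
    pvBgroups (w :: ws) acc =
      pvBgroups (ws.dropWhile (fun v => PySem.Str.len v == PySem.Str.len w))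
        (pvStep (PySem.Str.len w) (w :: ws.takeWhile (fun v => PySem.Str.len v == PySem.Str.len w)) acc) := by
  rw [pvBgroups, pvStep]

lemma pvFilterTake (L : Int) : ∀ ws : List String,
    ws.Pairwise (fun a b => PySem.Str.len b ≤ PySem.Str.len a) →
    (∀ v ∈ ws, PySem.Str.len v ≤ L) →
    ws.filter (fun v => PySem.Str.len v == L) = ws.takeWhile (fun v => PySem.Str.len v == L) := by
  intro ws
  induction ws with
  | nil => intro _ _; rfl
  | cons v vs ihv =>
    intro hp hle
    by_cases hv : (PySem.Str.len v == L) = true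
    · simp only [List.filter_cons, List.takeWhile_cons, hv, if_true]
      rw [ihv ((List.pairwise_cons.mp hp).2) (fun a ha => hle a (List.mem_cons_of_mem _ ha))]
    · have hv' : (PySem.Str.len v == L) = false := by simpa using hv
      simp only [List.filter_cons, List.takeWhile_cons, hv', if_false, Bool.false_eq_true]
      rw [List.filter_eq_nil_iff]
      intro z hz
      have h1 : PySem.Str.len z ≤ PySem.Str.len v := (List.pairwise_cons.mp hp).1 z hz
      have h2 : PySem.Str.len v ≤ L := hle v List.mem_cons_self
      simp only [beq_iff_eq] at hv ⊢
      omega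

lemma pvGroup (ks : List Int) : ∀ (s : List String) (acc : String),
    ks.Pairwise (· > ·) →
    s.Pairwise (fun a b => PySem.Str.len b ≤ PySem.Str.len a) →
    (∀ w ∈ s, PySem.Str.len w ∈ ks) →
    (∀ k ∈ ks, ∃ w ∈ s, PySem.Str.len w = k) →
    ks.foldl (fun acc l => pvStep l (s.filter (fun w => PySem.Str.len w == l)) acc) acc = pvBgroups s acc := by
  induction ks with
  | nil =>
    intro s acc _ _ hmem _
    cases s with
    | nil => rw [List.foldl_nil, pvBgroups_nil]
    | cons w ws => exact absurd (hmem w List.mem_cons_self) (List.not_mem_nil)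
  | cons k ks' ih =>
    intro s acc hks hs hmem hwit
    cases s with
    | nil => exact absurd (hwit k List.mem_cons_self) (by simp)
    | cons w ws =>
      have hksh := (List.pairwise_cons.mp hks).1   -- ∀ k' ∈ ks', k > k'
      have hkst := (List.pairwise_cons.mp hks).2
      have hsh := (List.pairwise_cons.mp hs).1     -- ∀ v ∈ ws, len v ≤ len w
      have hst := (List.pairwise_cons.mp hs).2
      -- k = len w
      have hkle : k ≤ PySem.Str.len w := by
        obtain ⟨u, hu, hku⟩ := hwit k List.mem_cons_self
        rcases List.mem_cons.mp hu with rfl | hu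
        · omega
        · have := hsh u hu; omega
      have hk : k = PySem.Str.len w := by
        rcases List.mem_cons.mp (hmem w List.mem_cons_self) with h | h
        · omega
        · have := hksh _ h; omega
      subst hk
      set L := PySem.Str.len w with hL
      set run := w :: ws.takeWhile (fun v => PySem.Str.len v == L) with hrun
      set rest := ws.dropWhile (fun v => PySem.Str.len v == L) with hrest
      have hsplit : ws = ws.takeWhile (fun v => PySem.Str.len v == L) ++ rest :=
        (List.takeWhile_append_dropWhile).symm
      have hfilter_ws : ws.filter (fun v => PySem.Str.len v == L) = ws.takeWhile (fun v => PySem.Str.len v == L) :=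
        pvFilterTake L ws hst hsh
      have htake : ∀ v ∈ ws.takeWhile (fun v => PySem.Str.len v == L), PySem.Str.len v = L := by
        intro v hv
        have := List.mem_takeWhile_imp hv
        simpa using this
      have hrestlt : ∀ v ∈ rest, PySem.Str.len v < L := by
        intro v hv
        have hle : PySem.Str.len v ≤ L := hsh v (by rw [hsplit]; exact List.mem_append_right _ hv)
        cases hrest' : rest with
        | nil => rw [hrest'] at hv; exact absurd hv (List.not_mem_nil)
        | cons r rs =>
          have hrfail : ¬ (PySem.Str.len r == L) = true := by
            have := List.head?_dropWhile_not (fun v => PySem.Str.len v == L) ws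
            rw [← hrest, hrest'] at this
            simpa using this
          have hrlt : PySem.Str.len r < L := by
            have hrle : PySem.Str.len r ≤ L := hsh r (by
              rw [hsplit, hrest']; exact List.mem_append_right _ List.mem_cons_self)
            simp only [beq_iff_eq] at hrfail
            omega
          rw [hrest'] at hv
          rcases List.mem_cons.mp hv with rfl | hv
          · exact hrlt
          · have hsub : (r :: rs).Pairwise (fun a b => PySem.Str.len b ≤ PySem.Str.len a) := by
              rw [← hrest', hrest]
              exact List.Pairwise.sublist (List.dropWhile_sublist _) hst
            have := (List.pairwise_cons.mp hsub).1 v hv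
            omega
      have hfilter_run : (w :: ws).filter (fun v => PySem.Str.len v == L) = run := by
        rw [List.filter_cons_of_pos (by rw [hL]; exact beq_self_eq_true _), hrun, hfilter_ws]
      have hfilter_rest : ∀ k' ∈ ks', (w :: ws).filter (fun v => PySem.Str.len v == k') = rest.filter (fun v => PySem.Str.len v == k') := by
        intro k' hk'
        have hlt : k' < L := hksh _ hk'
        rw [List.filter_cons_of_neg (by simp only [beq_iff_eq]; omega)]
        conv_lhs => rw [hsplit]
        rw [List.filter_append,
          List.filter_eq_nil_iff.mpr (by intro v hv; have := htake v hv; simp only [beq_iff_eq]; omega),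
          List.nil_append]
      -- IH hypotheses for rest
      have hrest_pair : rest.Pairwise (fun a b => PySem.Str.len b ≤ PySem.Str.len a) :=
        List.Pairwise.sublist (List.dropWhile_sublist _) hst
      have hrest_mem : ∀ v ∈ rest, PySem.Str.len v ∈ ks' := by
        intro v hv
        have hvs : v ∈ w :: ws := by
          rw [hsplit]; exact List.mem_cons_of_mem _ (List.mem_append_right _ hv)
        rcases List.mem_cons.mp (hmem v hvs) with h | h
        · have := hrestlt v hv; omega
        · exact h
      have hrest_wit : ∀ k' ∈ ks', ∃ v ∈ rest, PySem.Str.len v = k' := by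
        intro k' hk'
        obtain ⟨u, hu, hku⟩ := hwit k' (List.mem_cons_of_mem _ hk')
        have hlt : k' < L := hksh _ hk'
        refine ⟨u, ?_, hku⟩
        rcases List.mem_cons.mp hu with rfl | hu
        · omega
        · rw [hsplit] at hu
          rcases List.mem_append.mp hu with hu | hu
          · have := htake u hu; omega
          · exact hu
      -- assemble
      have hcongr := PySem.List.foldl_congr_mem ks'
        (fun acc l => pvStep l ((w :: ws).filter (fun v => PySem.Str.len v == l)) acc)
        (fun acc l => pvStep l (rest.filter (fun v => PySem.Str.len v == l)) acc)
        (pvStep L run acc)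
        (by intro acc' k' hk'; simp only; rw [hfilter_rest k' hk'])
      rw [List.foldl_cons, hfilter_run, hcongr,
        ih rest _ hkst hrest_pair hrest_mem hrest_wit, pvBgroups_cons, ← hL, ← hrun, ← hrest]

theorem pv_main (observation : String) (words : List String) :
    enhance_observation_with_word_results observation words =
    enhance_observation_with_word_results_alt observation words := by
  unfold enhance_observation_with_word_results enhance_observation_with_word_results_alt
  by_cases h : words = []
  · rw [if_pos h, if_pos h]
  · rw [if_neg h, if_neg h]
    show (PySem.List.sorted (words.foldl pvAStep PySem.Dict.empty).keys (fun k => k) true).foldl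
        (fun acc l => pvStep l ((words.foldl pvAStep PySem.Dict.empty).getD l []) acc)
        (observation ++ "\n\n" ++ "Here are some possible words you can form with the available letters:\n")
      = pvBgroups (PySem.List.sorted words (fun w => -(PySem.Str.len w)) false)
        (observation ++ "\n\n" ++ "Here are some possible words you can form with the available letters:\n")
    set s := PySem.List.sorted words (fun w => -(PySem.Str.len w)) false with hsdef
    have hkeys : (words.foldl pvAStep PySem.Dict.empty).keys = PySem.Set.ofList (words.map PySem.Str.len) := by
      rw [pvAfold_keys, ← PySem.Set.update_map_eq_foldl_add]
      simp [PySem.Set.update_nil_left]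
    have hsf : ∀ l, words.filter (fun v => PySem.Str.len v == l) = s.filter (fun v => PySem.Str.len v == l) := by
      intro l
      have hst := pvSorted_filter (fun w => -(PySem.Str.len w)) words (-l)
      rw [← hsdef] at hst
      have hconv : ∀ t : List String, t.filter (fun v => PySem.Str.len v == l) = t.filter (fun z => (-(PySem.Str.len z) == -l)) := by
        intro t
        apply List.filter_congr
        intro x _
        rw [Bool.eq_iff_iff]
        simp only [beq_iff_eq]
        omega
      rw [hconv words, hconv s, hst]
    have hgfun : (fun (acc : String) (l : Int) => pvStep l ((words.foldl pvAStep PySem.Dict.empty).getD l []) acc)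
        = (fun acc l => pvStep l (s.filter (fun v => PySem.Str.len v == l)) acc) := by
      funext acc l
      rw [pvAfold_getD, PySem.Dict.getD_empty, List.nil_append, hsf]
    rw [hgfun, hkeys]
    set ks := PySem.List.sorted (PySem.Set.ofList (words.map PySem.Str.len)) (fun k => k) true with hksdef
    have hksnd : ks.Nodup :=
      (PySem.List.sorted_perm _ _ _).symm.nodup (PySem.Set.nodup_ofList _)
    have hkspair : ks.Pairwise (· > ·) := by
      have h1 := PySem.List.sorted_pairwise_rev (PySem.Set.ofList (words.map PySem.Str.len)) (fun k => k)
      rw [← hksdef] at h1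
      exact (h1.and hksnd).imp (by rintro a b ⟨hab, hne⟩; omega)
    have hspair : s.Pairwise (fun a b => PySem.Str.len b ≤ PySem.Str.len a) := by
      have h1 := PySem.List.sorted_pairwise words (fun w => -(PySem.Str.len w))
      rw [← hsdef] at h1
      exact h1.imp (by intro a b hab; omega)
    have hmem : ∀ w ∈ s, PySem.Str.len w ∈ ks := by
      intro w hw
      rw [hksdef, PySem.List.mem_sorted, PySem.Set.mem_ofList]
      exact List.mem_map_of_mem ((PySem.List.mem_sorted _ _ _ _).mp hw)
    have hwit : ∀ k ∈ ks, ∃ w ∈ s, PySem.Str.len w = k := by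
      intro k hk
      rw [hksdef, PySem.List.mem_sorted, PySem.Set.mem_ofList, List.mem_map] at hk
      obtain ⟨w, hw, hwk⟩ := hk
      exact ⟨w, (PySem.List.mem_sorted _ _ _ _).mpr hw, hwk⟩
    exact pvGroup ks s _ hkspair hspair hmem hwit

-- ===== VERDICT (by name: the statement is the Claim_ definition above) =====
theorem enhance_observation_with_word_results_spec : Claim_equal_enhance_observation_with_word_results := by
  intro observation words _
  unfold Spec_enhance_observation_with_word_results
  exact pv_main observation words
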